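-- pv_equiv track=rewrite | github.com/LEO0331/ppt-design-md | backend/app/heuristics.py | infer_color_roles
-- ===== SOURCE A (Python) =====
-- def infer_color_roles(colors: list[str]) -> dict[str, list[str]]:
--     neutrals: list[str] = []
--     primary: list[str] = []
--     accents: list[str] = []
--
--     for color in colors:
--         if color in {"#000000", "#FFFFFF", "#F2F2F2", "#333333", "#666666", "#999999"}:
--             neutrals.append(color)
--         elif color.endswith(("00", "33", "66")):
--             primary.append(color)
--         else:
--             accents.append(color)
--
--     def uniq(values: list[str]) -> list[str]:
--         seen = set()
--         output = []
--         for v in values: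
--             if v not in seen:
--                 seen.add(v)
--                 output.append(v)
--         return output
--
--     return {
--         "neutrals": uniq(neutrals)[:6],
--         "primary": uniq(primary)[:6],
--         "accents": uniq(accents)[:6],
--     }
-- ===== SOURCE B (Python) =====
-- def infer_color_roles(colors: list[str]) -> dict[str, list[str]]:
--     # Single pass: global dedup + inline classification + inline cap at 6.
--     # Correct because each color maps to exactly one category, so a global
--     # first-seen dedup equals A's per-category uniq, and appending only while
--     # the bucket is short equals A's [:6] slice.
--     seen = set()
--     roles = {"neutrals": [], "primary": [], "accents": []}
--     for color in colors:
--         if color in seen: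
--             continue
--         seen.add(color)
--         if color in {"#000000", "#FFFFFF", "#F2F2F2", "#333333", "#666666", "#999999"}:
--             bucket = roles["neutrals"]
--         elif color.endswith(("00", "33", "66")):
--             bucket = roles["primary"]
--         else:
--             bucket = roles["accents"]
--         if len(bucket) < 6:
--             bucket.append(color)
--     return roles
-- ===== Notes on version B (the rewrite author's own statement) =====
-- stated objective: simpler
-- what changed: Collapsed A's four phases (classify loop, three uniq passes, three slices) into one pass keeping a single global seen-set and three buckets capped inline at 6.
import Mathlib
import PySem

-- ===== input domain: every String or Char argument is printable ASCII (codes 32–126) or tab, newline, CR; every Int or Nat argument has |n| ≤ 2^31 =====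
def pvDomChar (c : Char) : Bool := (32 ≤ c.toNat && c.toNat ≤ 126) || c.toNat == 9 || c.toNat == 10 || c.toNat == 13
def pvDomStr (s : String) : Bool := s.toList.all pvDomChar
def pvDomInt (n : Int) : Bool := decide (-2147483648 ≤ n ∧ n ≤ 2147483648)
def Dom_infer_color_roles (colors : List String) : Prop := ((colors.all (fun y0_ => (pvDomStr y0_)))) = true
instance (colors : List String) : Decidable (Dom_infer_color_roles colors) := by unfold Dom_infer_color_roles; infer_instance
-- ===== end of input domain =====

-- B collapses A's four phases (classify loop, three uniq passes, three [:6] slices)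
-- into a single pass with one global seen-set and three buckets capped inline at 6 (objective: simpler).

-- shared branch conditions (the same tests both Pythons write inline)
def icNeutral (c : String) : Bool :=
  (["#000000", "#FFFFFF", "#F2F2F2", "#333333", "#666666", "#999999"] : List String).contains c

def icSuffix (c : String) : Bool :=
  PySem.Str.endswith c "00" || PySem.Str.endswith c "33" || PySem.Str.endswith c "66"

-- ===== PORT A =====
-- the body of A's classification loop
def icAStep (st : List String × List String × List String) (color : String) :
    List String × List String × List String :=
  if icNeutral color then (st.1 ++ [color], st.2.1, st.2.2)
  else if icSuffix color then (st.1, st.2.1 ++ [color], st.2.2)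
  else (st.1, st.2.1, st.2.2 ++ [color])

-- the body of the loop inside A's helper `uniq`
def icUStep (st : PySem.Set String × List String) (v : String) :
    PySem.Set String × List String :=
  if PySem.Set.contains st.1 v then st else (PySem.Set.add st.1 v, st.2 ++ [v])

-- A's inner helper `uniq`
def icUniq (values : List String) : List String :=
  (values.foldl icUStep ((PySem.Set.empty : PySem.Set String), ([] : List String))).2

def infer_color_roles (colors : List String) : List (String × List String) :=
  let st := colors.foldl icAStep (([] : List String), ([] : List String), ([] : List String))
  [("neutrals", (icUniq st.1).take 6),
   ("primary", (icUniq st.2.1).take 6),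
   ("accents", (icUniq st.2.2).take 6)]

-- ===== PORT B =====
-- the body of B's single loop: global dedup, classify, append while the bucket has < 6 entries
def icBStep (st : PySem.Set String × List String × List String × List String) (color : String) :
    PySem.Set String × List String × List String × List String :=
  if PySem.Set.contains st.1 color then st
  else
    let seen := PySem.Set.add st.1 color
    if icNeutral color then
      (seen, (if st.2.1.length < 6 then st.2.1 ++ [color] else st.2.1), st.2.2.1, st.2.2.2)
    else if icSuffix color then
      (seen, st.2.1, (if st.2.2.1.length < 6 then st.2.2.1 ++ [color] else st.2.2.1), st.2.2.2)
    else
      (seen, st.2.1, st.2.2.1, (if st.2.2.2.length < 6 then st.2.2.2 ++ [color] else st.2.2.2))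

def infer_color_roles_alt (colors : List String) : List (String × List String) :=
  let st := colors.foldl icBStep
    ((PySem.Set.empty : PySem.Set String), ([] : List String), ([] : List String), ([] : List String))
  [("neutrals", st.2.1), ("primary", st.2.2.1), ("accents", st.2.2.2)]

-- ===== PRECONDITION & SPEC =====
def Spec_infer_color_roles (colors : List String) (out : List (String × List String)) : Prop := out = infer_color_roles_alt colors
instance (colors : List String) (out : List (String × List String)) : Decidable (Spec_infer_color_roles colors out) := by unfold Spec_infer_color_roles; infer_instance

-- ===== CLAIM (what is proved, stated in full; the proofs are below) =====
def Claim_equal_infer_color_roles : Prop := ∀ (colors : List String), Dom_infer_color_roles colors → Spec_infer_color_roles colors (infer_color_roles colors)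

-- ===== LEMMAS AND PROOFS =====

-- the three mutually exclusive, exhaustive category predicates
def icP0 (c : String) : Bool := icNeutral c
def icP1 (c : String) : Bool := !icNeutral c && icSuffix c
def icP2 (c : String) : Bool := !icNeutral c && !icSuffix c

-- A's classification loop produces the three filters
theorem ic_classify (l : List String) (n p a : List String) :
    l.foldl icAStep (n, p, a) = (n ++ l.filter icP0, p ++ l.filter icP1, a ++ l.filter icP2) := by
  induction l generalizing n p a with
  | nil => simp
  | cons c t ih =>
    simp only [List.foldl_cons, List.filter_cons, icP0, icP1, icP2, icAStep]
    by_cases h0 : icNeutral c <;> by_cases h1 : icSuffix c <;>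
      simp [h0, h1, ih, List.append_assoc]

-- the seen-set of A's uniq fold contains exactly the initial seen plus the processed elements
theorem icUniq_seen (l : List String) (s : PySem.Set String) (o : List String) (c : String) :
    c ∈ (l.foldl icUStep (s, o)).1 ↔ c ∈ s ∨ c ∈ l := by
  induction l generalizing s o with
  | nil => simp
  | cons x t ih =>
    simp only [List.foldl_cons, icUStep]
    by_cases hx : x ∈ s
    · rw [if_pos ((PySem.Set.contains_iff s x).mpr hx), ih]
      constructor
      · rintro (h | h)
        · exact Or.inl h
        · exact Or.inr (List.mem_cons_of_mem _ h)
      · rintro (h | h)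
        · exact Or.inl h
        · rcases List.mem_cons.mp h with rfl | h'
          · exact Or.inl hx
          · exact Or.inr h'
    · rw [if_neg (fun hcon => hx ((PySem.Set.contains_iff s x).mp hcon)), ih,
          PySem.Set.mem_add]
      simp only [List.mem_cons]
      tauto

theorem icUniq_snoc (x : List String) (c : String) :
    icUniq (x ++ [c]) = if c ∈ x then icUniq x else icUniq x ++ [c] := by
  have hseen := icUniq_seen x (PySem.Set.empty) [] c
  unfold icUniq
  rw [List.foldl_append]
  simp only [List.foldl_cons, List.foldl_nil, icUStep]
  by_cases h : c ∈ x
  · have hm : PySem.Set.contains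
        (x.foldl icUStep ((PySem.Set.empty : PySem.Set String), ([] : List String))).1 c = true :=
      (PySem.Set.contains_iff _ _).mpr (hseen.mpr (Or.inr h))
    rw [if_pos h, hm, if_pos rfl]
  · have hnot : ¬ PySem.Set.contains
        (x.foldl icUStep ((PySem.Set.empty : PySem.Set String), ([] : List String))).1 c = true := by
      intro hcon
      rcases hseen.mp ((PySem.Set.contains_iff _ _).mp hcon) with h' | h'
      · simp [PySem.Set.empty] at h'
      · exact h h'
    rw [if_neg h, if_neg hnot]

theorem ic_take_snoc (L : List String) (c : String) :
    (L ++ [c]).take 6 = if L.length < 6 then L.take 6 ++ [c] else L.take 6 := by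
  by_cases h : L.length < 6
  · rw [if_pos h, List.take_of_length_le (by simp; omega), List.take_of_length_le (by omega)]
  · rw [if_neg h, List.take_append_of_le_length (by omega)]

theorem ic_ofList_snoc (q : List String) (c : String) :
    PySem.Set.ofList (q ++ [c]) = PySem.Set.add (PySem.Set.ofList q) c := by
  rw [PySem.Set.ofList_eq_foldl, PySem.Set.ofList_eq_foldl, List.foldl_append]
  rfl

-- the abstract state B's fold maintains after processing q
def icF (q : List String) : PySem.Set String × List String × List String × List String :=
  (PySem.Set.ofList q,
   (icUniq (q.filter icP0)).take 6,
   (icUniq (q.filter icP1)).take 6,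
   (icUniq (q.filter icP2)).take 6)

theorem ic_uniq_take_skip (q : List String) (p : String → Bool) (c : String) (hc : c ∈ q) :
    (icUniq ((q ++ [c]).filter p)).take 6 = (icUniq (q.filter p)).take 6 := by
  rw [List.filter_append]
  by_cases hp : p c
  · rw [List.filter_cons_of_pos hp, List.filter_nil, icUniq_snoc,
        if_pos (List.mem_filter.mpr ⟨hc, hp⟩)]
  · rw [List.filter_cons_of_neg (by simp [hp]), List.filter_nil, List.append_nil]

theorem ic_uniq_take_other (q : List String) (p : String → Bool) (c : String) (hp : p c = false) :
    (icUniq ((q ++ [c]).filter p)).take 6 = (icUniq (q.filter p)).take 6 := by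
  rw [List.filter_append, List.filter_cons_of_neg (by simp [hp]), List.filter_nil, List.append_nil]

theorem ic_len_take_lt (L : List String) : ((L.take 6).length < 6) ↔ (L.length < 6) := by
  simp only [List.length_take]
  omega

theorem ic_uniq_take_hit (q : List String) (p : String → Bool) (c : String)
    (hc : ¬ c ∈ q) (hp : p c = true) :
    (icUniq ((q ++ [c]).filter p)).take 6 =
      (if ((icUniq (q.filter p)).take 6).length < 6
       then (icUniq (q.filter p)).take 6 ++ [c] else (icUniq (q.filter p)).take 6) := by
  rw [List.filter_append, List.filter_cons_of_pos hp, List.filter_nil]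
  rw [icUniq_snoc, if_neg (fun h => hc (List.mem_filter.mp h).1), ic_take_snoc]
  by_cases h : (icUniq (q.filter p)).length < 6
  · rw [if_pos h, if_pos ((ic_len_take_lt _).mpr h)]
  · rw [if_neg h, if_neg (fun hh => h ((ic_len_take_lt _).mp hh))]

theorem ic_bstep (q : List String) (c : String) :
    icBStep (icF q) c = icF (q ++ [c]) := by
  unfold icBStep icF
  by_cases hc : c ∈ q
  · have hcn : PySem.Set.contains (PySem.Set.ofList q) c = true := by
      simp [PySem.Set.mem_ofList q c, hc]
    have hs : PySem.Set.ofList (q ++ [c]) = PySem.Set.ofList q := by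
      rw [ic_ofList_snoc, PySem.Set.add, hcn]; simp
    rw [hcn, if_pos rfl, hs, ic_uniq_take_skip q icP0 c hc, ic_uniq_take_skip q icP1 c hc,
        ic_uniq_take_skip q icP2 c hc]
  · have hcn : PySem.Set.contains (PySem.Set.ofList q) c = false := by
      simp [PySem.Set.mem_ofList q c, hc]
    rw [hcn, if_neg (by simp), ic_ofList_snoc]
    by_cases h0 : icNeutral c
    · rw [if_pos h0,
          ic_uniq_take_hit q icP0 c hc (by simp [icP0, h0]),
          ic_uniq_take_other q icP1 c (by simp [icP1, h0]),
          ic_uniq_take_other q icP2 c (by simp [icP2, h0])]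
    · by_cases h1 : icSuffix c
      · rw [if_neg h0, if_pos h1,
            ic_uniq_take_other q icP0 c (by simp [icP0, h0]),
            ic_uniq_take_hit q icP1 c hc (by simp [icP1, h0, h1]),
            ic_uniq_take_other q icP2 c (by simp [icP2, h1])]
      · rw [if_neg h0, if_neg h1,
            ic_uniq_take_other q icP0 c (by simp [icP0, h0]),
            ic_uniq_take_other q icP1 c (by simp [icP1, h1]),
            ic_uniq_take_hit q icP2 c hc (by simp [icP2, h0, h1])]

theorem ic_bfold (l q : List String) :
    l.foldl icBStep (icF q) = icF (q ++ l) := by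
  induction l generalizing q with
  | nil => simp
  | cons c t ih =>
    rw [List.foldl_cons, ic_bstep, ih, List.append_assoc]
    rfl

-- ===== VERDICT (by name: the statement is the Claim_ definition above) =====
theorem infer_color_roles_spec : Claim_equal_infer_color_roles := by
  intro colors _
  unfold Spec_infer_color_roles infer_color_roles infer_color_roles_alt
  have hA := ic_classify colors [] [] []
  have hB := ic_bfold colors []
  simp only [List.nil_append] at hA hB
  have hF : icF [] = ((PySem.Set.empty : PySem.Set String), ([] : List String),
      ([] : List String), ([] : List String)) := rfl
  rw [hF] at hB
  rw [hA, hB]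
  rfl
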